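-- pv_equiv track=rewrite | github.com/pypi-data/pypi-mirror-401 | packages/pulka/pulka-0.3.0-py3-none-any.whl/pulka/core/formatting.py | _simplify_dtype_text
-- ===== SOURCE A (Python) =====
-- _DTYPE_DETAIL_DELIMITERS: tuple[str, ...] = ("(", "[", "<")
--
-- def _simplify_dtype_text(dtype: object) -> str:
--     """Return a short, human-friendly representation of a Polars dtype."""
--
--     if dtype is None:
--         return ""
--
--     text = str(dtype)
--     for delimiter in _DTYPE_DETAIL_DELIMITERS:
--         if delimiter in text:
--             text = text.split(delimiter, 1)[0]
--     return text.strip()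
-- ===== SOURCE B (Python) =====
-- _DTYPE_DETAIL_DELIMITERS: tuple[str, ...] = ("(", "[", "<")
--
--
-- def _simplify_dtype_text(dtype: object) -> str:
--     """Return a short, human-friendly representation of a Polars dtype."""
--
--     if dtype is None:
--         return ""
--
--     text = str(dtype)
--     positions = [p for p in (text.find(d) for d in _DTYPE_DETAIL_DELIMITERS) if p != -1]
--     cut = min(positions) if positions else len(text)
--     return text[:cut].strip()
-- ===== Notes on version B (the rewrite author's own statement) =====
-- stated objective: simpler
-- what changed: Instead of A's loop that repeatedly tests membership and re-splits the shrinking text once per delimiter, B computes each delimiter's first position with find, takes the minimum cut point (or the full length when no delimiter occurs) and slices the original text once before stripping.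
import Mathlib
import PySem

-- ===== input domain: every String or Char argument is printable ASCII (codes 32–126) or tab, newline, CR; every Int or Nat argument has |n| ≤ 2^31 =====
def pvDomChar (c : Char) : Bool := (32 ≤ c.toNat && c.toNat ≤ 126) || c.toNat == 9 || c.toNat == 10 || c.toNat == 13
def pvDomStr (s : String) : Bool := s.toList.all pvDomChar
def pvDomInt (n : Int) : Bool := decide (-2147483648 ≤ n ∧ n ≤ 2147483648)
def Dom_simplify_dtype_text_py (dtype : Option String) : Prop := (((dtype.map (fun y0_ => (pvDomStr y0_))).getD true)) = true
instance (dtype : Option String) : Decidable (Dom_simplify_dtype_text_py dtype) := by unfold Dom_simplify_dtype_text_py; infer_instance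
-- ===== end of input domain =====

-- B replaces A's loop of membership-test + re-split per delimiter by one pass: the minimum find position of the
-- delimiters, a single slice there, then strip (objective: simpler; same result, proved equal below).

-- ===== PORT A =====
def simplify_dtype_text_py (dtype : Option String) : String :=
  match dtype with
  | none => ""
  | some s =>
      let text := ["(", "[", "<"].foldl
        (fun t d =>
          if PySem.Str.isIn d t then
            ((PySem.Str.splitMax? t d 1).getD []).headD t   -- text.split(delimiter, 1)[0]; sep ≠ "" so the option is some and the list nonempty
          else t) s
      PySem.Str.strip text

-- ===== PORT B =====
def simplify_dtype_text_py_alt (dtype : Option String) : String :=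
  match dtype with
  | none => ""
  | some text =>
      let positions := (["(", "[", "<"].map (fun d => PySem.Str.find text d)).filter (fun p => p != -1)
      let cut : Int :=
        match PySem.List.min? positions (fun p => p) with
        | some m => m
        | none => (PySem.Str.len text : Int)
      PySem.Str.strip (PySem.Str.slice text none (some cut))

-- ===== PRECONDITION & SPEC =====
def Spec_simplify_dtype_text_py (dtype : Option String) (out : String) : Prop := out = simplify_dtype_text_py_alt dtype
instance (dtype : Option String) (out : String) : Decidable (Spec_simplify_dtype_text_py dtype out) := by unfold Spec_simplify_dtype_text_py; infer_instance

-- ===== CLAIM (what is proved, stated in full; the proofs are below) =====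
def Claim_equal_simplify_dtype_text_py : Prop := ∀ (dtype : Option String), Dom_simplify_dtype_text_py dtype → Spec_simplify_dtype_text_py dtype (simplify_dtype_text_py dtype)

-- ===== LEMMAS AND PROOFS =====

-- the delimiter predicate: a character is one of '(', '[', '<'
def pvIsDelim (a : Char) : Bool := a == '(' || a == '[' || a == '<'

-- splitOnMax.go with maxsplit exhausted returns the remainder in one piece
theorem pv_go_zero (c : Char) (fuel : Nat) (l cur : List Char) (acc : List (List Char)) :
    PySem.Chars.splitOnMax.go [c] fuel 0 l cur acc = ((cur.reverse ++ l) :: acc).reverse := by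
  cases fuel with
  | zero => simp [PySem.Chars.splitOnMax.go]
  | succ f => cases l <;> simp [PySem.Chars.splitOnMax.go]

-- head of split(sep, 1) is the prefix before the first occurrence of the (single-char) separator
theorem pv_go_one (c : Char) (l : List Char) : ∀ (fuel : Nat) (cur : List Char), l.length ≤ fuel →
    (PySem.Chars.splitOnMax.go [c] fuel 1 l cur []).head? = some (cur.reverse ++ l.takeWhile (· != c)) := by
  induction l with
  | nil =>
      intro fuel cur _
      cases fuel <;> simp [PySem.Chars.splitOnMax.go]
  | cons c' rest ih =>
      intro fuel cur hf
      cases fuel with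
      | zero => simp at hf
      | succ f =>
          by_cases h : c' = c
          · subst h
            simp only [PySem.Chars.splitOnMax.go, List.isPrefixOf, Bool.and_eq_true, beq_self_eq_true,
              and_self, if_true, if_neg (one_ne_zero)]
            rw [pv_go_zero]
            simp
          · have hne : ([c].isPrefixOf (c' :: rest)) = false := by
              simp [List.isPrefixOf]; exact fun hh => (h hh.symm).elim
            rw [show PySem.Chars.splitOnMax.go [c] (f+1) 1 (c' :: rest) cur [] =
                  PySem.Chars.splitOnMax.go [c] f 1 rest (c' :: cur) [] by
                  simp [PySem.Chars.splitOnMax.go, hne]]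
            rw [ih f (c' :: cur) (by simpa using Nat.lt_succ_iff.mp (Nat.lt_of_lt_of_le (Nat.lt_succ_self _) hf))]
            simp [h]

-- Python find for a single-character needle, characterised by List.findIdx
theorem pv_find_char (c : Char) (cs : List Char) :
    PySem.Chars.find cs [c] = if c ∈ cs then ((cs.findIdx (· == c) : Nat) : Int) else -1 := by
  by_cases h : c ∈ cs
  · have hinf : [c] <:+: cs := (List.singleton_infix_iff c cs).mpr h
    have hnn : 0 ≤ PySem.Chars.find cs [c] := (PySem.Chars.find_nonneg_iff _ _).mpr hinf
    obtain ⟨hpre, hmin⟩ := PySem.Chars.find_spec hnn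
    set n := (PySem.Chars.find cs [c]).toNat with hn
    obtain ⟨t, ht⟩ := hpre
    have hget : cs[n]? = some c := by
      have h0 : (cs.drop n)[0]? = some c := by rw [← ht]; rfl
      rw [List.getElem?_drop] at h0; simpa using h0
    have hlt : n < cs.length := (List.getElem?_eq_some_iff.mp hget).1
    have hcn : cs[n] = c := by
      have := List.getElem?_eq_getElem hlt
      rw [this] at hget; exact Option.some_injective _ hget
    have hidx : cs.findIdx (· == c) = n := by
      rw [List.findIdx_eq hlt]
      refine ⟨by simp [hcn], ?_⟩
      intro j hj
      by_contra hcj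
      have hjc : cs[j] = c := by simpa using hcj
      have hjlt : j < cs.length := Nat.lt_trans hj hlt
      exact hmin j hj ⟨cs.drop (j+1), by
        have : cs.drop j = c :: cs.drop (j+1) := by
          rw [List.drop_eq_getElem_cons hjlt, hjc]
        simp [this]⟩
    rw [if_pos h, hidx, hn]
    omega
  · rw [if_neg h]
    exact (PySem.Chars.find_eq_neg_one_iff _ _).mpr (fun hi => h ((List.singleton_infix_iff c cs).mp hi))

-- A's loop body equals takeWhile (· != c) at the character-list level
theorem pv_stepA (t d : String) (c : Char) (hd : d.toList = [c]) :
    (if PySem.Str.isIn d t then ((PySem.Str.splitMax? t d 1).getD []).headD t else t).toList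
      = t.toList.takeWhile (· != c) := by
  by_cases h : c ∈ t.toList
  · have hin : PySem.Str.isIn d t = true := by
      rw [PySem.Str.isIn_eq, hd]
      exact (PySem.Chars.isIn_iff_infix _ _).mpr ((List.singleton_infix_iff c t.toList).mpr h)
    rw [if_pos hin]
    have hmap := PySem.Str.splitMax?_map t d 1
    rw [hd] at hmap
    have hsm : PySem.Chars.splitMax? t.toList [c] 1 = some (PySem.Chars.splitOnMax t.toList [c] 1) := by
      simp [PySem.Chars.splitMax?]
    rw [hsm] at hmap
    cases hsp : PySem.Str.splitMax? t d 1 with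
    | none => rw [hsp] at hmap; simp at hmap
    | some parts =>
        rw [hsp] at hmap
        simp only [Option.map_some, Option.some.injEq] at hmap
        have hhead : (PySem.Chars.splitOnMax t.toList [c] 1).head? = some (t.toList.takeWhile (· != c)) := by
          have : PySem.Chars.splitOnMax t.toList [c] 1
              = PySem.Chars.splitOnMax.go [c] (t.toList.length + 1) 1 t.toList [] [] := by
            simp [PySem.Chars.splitOnMax]
          rw [this, pv_go_one c t.toList (t.toList.length + 1) [] (Nat.le_succ _)]
          simp
        rw [← hmap] at hhead
        cases parts with
        | nil => simp at hhead
        | cons p ps =>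
            simp only [List.map_cons, List.head?_cons, Option.some.injEq] at hhead
            simp [hhead]
  · have hin : PySem.Chars.isIn [c] t.toList = false :=
      (PySem.Chars.isIn_eq_false_iff _ _).mpr (fun hi => h ((List.singleton_infix_iff c t.toList).mp hi))
    rw [if_neg (by simp [PySem.Str.isIn_eq, hd, hin])]
    exact (List.takeWhile_eq_self_iff.mpr (fun a ha => by
      simp; exact fun hac => h (hac ▸ ha))).symm

-- min? of a list with no element is none; helper for nonempty
theorem pv_min?_ne_none {xs : List Int} (h : xs ≠ []) :
    PySem.List.min? xs (fun p => p) ≠ none := by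
  simp [PySem.List.min?_eq_none_iff, h]

-- B's cut index equals findIdx of the delimiter predicate
theorem pv_cut_eq (cs : List Char) :
    (match PySem.List.min? ((([ '(', '[', '<' ].map (fun c => PySem.Chars.find cs [c])).filter
        (fun p => p != -1))) (fun p => p) with
      | some m => m
      | none => (cs.length : Int))
      = ((cs.findIdx pvIsDelim : Nat) : Int) := by
  set k := cs.findIdx pvIsDelim with hk
  by_cases hmem : '(' ∈ cs ∨ '[' ∈ cs ∨ '<' ∈ cs
  · -- some delimiter occurs
    have hklt : k < cs.length := by
      rw [hk]
      apply List.findIdx_lt_length.mpr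
      rcases hmem with h | h | h
      · exact ⟨'(', h, by simp [pvIsDelim]⟩
      · exact ⟨'[', h, by simp [pvIsDelim]⟩
      · exact ⟨'<', h, by simp [pvIsDelim]⟩
    have hck : pvIsDelim cs[k] = true := List.findIdx_getElem (w := hklt)
    -- (↑k) is in the positions list
    have hfidx : cs.findIdx (· == cs[k]) = k := by
      rw [List.findIdx_eq hklt]
      refine ⟨by simp, ?_⟩
      intro j hj
      by_contra hcj
      have hjeq : cs[j] = cs[k] := by simpa using hcj
      have hfj := List.not_of_lt_findIdx (p := pvIsDelim) (hk ▸ hj)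
      have hcontra : pvIsDelim cs[k] = false := by rw [← hjeq]; exact hfj
      rw [hck] at hcontra; exact Bool.false_ne_true hcontra.symm
    have hfindk : PySem.Chars.find cs [cs[k]] = (k : Int) := by
      rw [pv_find_char, if_pos (List.getElem_mem hklt), hfidx]
    have hkmem : (k : Int) ∈ (([ '(', '[', '<' ].map (fun c => PySem.Chars.find cs [c])).filter
        (fun p => p != -1)) := by
      apply List.mem_filter.mpr
      constructor
      · apply List.mem_map.mpr
        refine ⟨cs[k], ?_, hfindk⟩
        have hck2 := hck
        simp only [pvIsDelim, Bool.or_eq_true, beq_iff_eq] at hck2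
        simp only [List.mem_cons, List.not_mem_nil, or_false]
        tauto
      · simp
    -- every position is ≥ k
    have hlb : ∀ p ∈ (([ '(', '[', '<' ].map (fun c => PySem.Chars.find cs [c])).filter
        (fun p => p != -1)), (k : Int) ≤ p := by
      intro p hp
      obtain ⟨hpm, hpne⟩ := List.mem_filter.mp hp
      obtain ⟨c, hcmem, hcp⟩ := List.mem_map.mp hpm
      have hcdelim : pvIsDelim c = true := by
        simp only [List.mem_cons, List.not_mem_nil, or_false] at hcmem
        rcases hcmem with h | h | h <;> simp [pvIsDelim, h]
      by_cases hcin : c ∈ cs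
      · rw [pv_find_char, if_pos hcin] at hcp
        subst hcp
        have : k ≤ cs.findIdx (· == c) := by
          by_contra hlt
          push Not at hlt
          have hmlt : cs.findIdx (· == c) < cs.length := List.findIdx_lt_length.mpr ⟨c, hcin, by simp⟩
          have hmc : cs[cs.findIdx (· == c)] = c := by
            have := List.findIdx_getElem (p := (· == c)) (w := hmlt)
            simpa using this
          have hfm := List.not_of_lt_findIdx (p := pvIsDelim) (hk ▸ hlt)
          have hcontra : pvIsDelim c = false := by rw [← hmc]; exact hfm
          rw [hcdelim] at hcontra
          exact Bool.false_ne_true hcontra.symm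
        exact_mod_cast this
      · rw [pv_find_char, if_neg hcin] at hcp
        subst hcp
        simp at hpne
    -- conclude via min?
    cases hmn : PySem.List.min? ((([ '(', '[', '<' ].map (fun c => PySem.Chars.find cs [c])).filter
        (fun p => p != -1))) (fun p => p) with
    | none => exact absurd hmn (pv_min?_ne_none (List.ne_nil_of_mem hkmem))
    | some m =>
        have h1 : (k : Int) ≤ m := hlb m (PySem.List.min?_mem hmn)
        have h2 : m ≤ (k : Int) := PySem.List.min?_isMin hmn _ hkmem
        simp only []
        omega
  · -- no delimiter occurs
    push Not at hmem
    obtain ⟨h1, h2, h3⟩ := hmem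
    have hfilter : (([ '(', '[', '<' ].map (fun c => PySem.Chars.find cs [c])).filter
        (fun p => p != -1)) = [] := by
      simp [pv_find_char, h1, h2, h3]
    rw [hfilter]
    simp only [PySem.List.min?, List.foldl_nil]
    have : cs.findIdx pvIsDelim = cs.length := by
      apply List.findIdx_eq_length.mpr
      intro x hx
      simp only [pvIsDelim, Bool.or_eq_false_iff, beq_eq_false_iff_ne]
      exact ⟨⟨fun h => h1 (h ▸ hx), fun h => h2 (h ▸ hx)⟩, fun h => h3 (h ▸ hx)⟩
    rw [hk, this]

-- A's trimmed text equals take (findIdx pvIsDelim) at the list level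
theorem pv_A_list (s : String) :
    (["(", "[", "<"].foldl
        (fun t d =>
          if PySem.Str.isIn d t then ((PySem.Str.splitMax? t d 1).getD []).headD t else t) s).toList
      = s.toList.takeWhile (fun a => !(pvIsDelim a)) := by
  simp only [List.foldl_cons, List.foldl_nil]
  rw [pv_stepA _ "<" '<' rfl]
  have h2 : (if PySem.Str.isIn "[" (if PySem.Str.isIn "(" s then ((PySem.Str.splitMax? s "(" 1).getD []).headD s else s)
      then ((PySem.Str.splitMax? (if PySem.Str.isIn "(" s then ((PySem.Str.splitMax? s "(" 1).getD []).headD s else s) "[" 1).getD []).headD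
        (if PySem.Str.isIn "(" s then ((PySem.Str.splitMax? s "(" 1).getD []).headD s else s)
      else (if PySem.Str.isIn "(" s then ((PySem.Str.splitMax? s "(" 1).getD []).headD s else s)).toList
      = ((if PySem.Str.isIn "(" s then ((PySem.Str.splitMax? s "(" 1).getD []).headD s else s)).toList.takeWhile (· != '[') :=
    pv_stepA _ "[" '[' rfl
  rw [h2, pv_stepA s "(" '(' rfl]
  rw [List.takeWhile_takeWhile, List.takeWhile_takeWhile]
  congr 1
  funext a
  by_cases h1 : a = '(' <;> by_cases hb : a = '[' <;> by_cases h3 : a = '<' <;>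
    simp [h1, hb, h3, pvIsDelim]

-- ===== VERDICT (by name: the statement is the Claim_ definition above) =====
set_option maxHeartbeats 1000000 in
theorem simplify_dtype_text_py_spec : Claim_equal_simplify_dtype_text_py := by
  intro dtype _
  unfold Spec_simplify_dtype_text_py simplify_dtype_text_py simplify_dtype_text_py_alt
  cases dtype with
  | none => rfl
  | some s =>
      simp only []
      apply String.toList_inj.mp
      rw [PySem.Str.toList_strip, PySem.Str.toList_strip]
      refine congrArg PySem.Chars.strip ?_
      rw [pv_A_list, PySem.Str.toList_slice, PySem.Chars.slice_eq_listSlice]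
      have hpos : (["(", "[", "<"].map (fun d => PySem.Str.find s d)).filter (fun p => p != -1)
          = ([ '(', '[', '<' ].map (fun c => PySem.Chars.find s.toList [c])).filter (fun p => p != -1) := by
        simp [PySem.Str.find_eq]
      rw [show (PySem.Str.len s : Int) = (s.toList.length : Int) by rw [PySem.Str.len_eq]]
      rw [hpos, pv_cut_eq]
      rw [PySem.List.slice_to s.toList (by positivity)]
      rw [Int.toNat_natCast]
      rw [List.takeWhile_eq_take_findIdx_not]
      simp only [Bool.not_not]
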